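-- pv_equiv track=rewrite | github.com/vitali87/code-graph-rag | scripts/check_comments.py | find_comment_start
-- ===== SOURCE A (Python) =====
-- def find_comment_start(line: str) -> int | None:
--     """Find the index where a real comment starts, or None if no comment.
--
--     Properly handles quotes inside strings by tracking string state.
--     """
--     in_string = None  # (H) None, '"', or "'"
--     i = 0
--     while i < len(line):
--         char = line[i]
--
--         # (H) Handle escape sequences
--         if char == "\\" and in_string and i + 1 < len(line):
--             i += 2
--             continue
--
--         # (H) Handle string delimiters
--         if char in ('"', "'"):
--             if in_string is None:
--                 in_string = char
--             elif in_string == char: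
--                 in_string = None
--             i += 1
--             continue
--
--         # (H) Hash outside of string is a comment
--         if char == "#" and in_string is None:
--             return i
--
--         i += 1
--
--     return None
-- ===== SOURCE B (Python) =====
-- def _skip_string(line, i, quote):
--     """Scan from i inside a string opened by `quote`; return the index just
--     past the closing quote (or len(line) if unterminated)."""
--     n = len(line)
--     while i < n:
--         c = line[i]
--         if c == "\\":
--             if i + 1 < n:
--                 i += 2
--             else:
--                 i += 1
--         elif c == quote:
--             return i + 1
--         else:
--             i += 1
--     return i
--
--
-- def find_comment_start(line: str) -> int | None:
--     n = len(line)
--     i = 0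
--     while i < n:
--         c = line[i]
--         if c == "#":
--             return i
--         if c in ('"', "'"):
--             i = _skip_string(line, i + 1, c)
--         else:
--             i += 1
--     return None
-- ===== Notes on version B (the rewrite author's own statement) =====
-- stated objective: alternative
-- what changed: Replaced A's single while loop carrying a persistent in_string flag (and flag-dependent escape/quote/hash branches) by a flagless outer scan that, on a quote, delegates to a nested helper _skip_string which consumes the whole string literal (handling escapes) and returns the resume index.
import Mathlib
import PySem

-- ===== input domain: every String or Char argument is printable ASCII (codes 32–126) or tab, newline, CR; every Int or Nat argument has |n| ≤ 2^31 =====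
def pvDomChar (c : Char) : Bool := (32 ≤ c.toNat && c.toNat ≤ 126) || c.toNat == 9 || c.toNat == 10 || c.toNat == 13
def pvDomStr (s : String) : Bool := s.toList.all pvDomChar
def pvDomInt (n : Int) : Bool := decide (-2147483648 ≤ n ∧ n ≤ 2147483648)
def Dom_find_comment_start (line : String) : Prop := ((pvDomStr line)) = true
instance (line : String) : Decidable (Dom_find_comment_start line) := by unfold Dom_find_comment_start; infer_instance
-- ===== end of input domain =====

-- B replaces A's persistent in_string flag by a flagless outer scan with a nested
-- string-consuming helper; same O(n) cost, different decomposition (objective: alternative).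


-- ===== PORT A =====
-- A's while loop over indices, transcribed as structural recursion on the character
-- list with the running index i and the persistent in_string flag as state.
def fcsGoA (s : List Char) (inStr : Option Char) (i : Int) : Option Int :=
  match s with
  | [] => none
  | c :: rest =>
    -- escape sequence: '\' while inside a string and a next char exists
    if c = '\\' ∧ inStr ≠ none ∧ rest ≠ [] then
      fcsGoA rest.tail inStr (i + 2)
    -- string delimiters
    else if c = '"' ∨ c = '\'' then
      match inStr with
      | none => fcsGoA rest (some c) (i + 1)
      | some q => if q = c then fcsGoA rest none (i + 1) else fcsGoA rest (some q) (i + 1)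
    -- hash outside of string is a comment
    else if c = '#' ∧ inStr = none then some i
    else fcsGoA rest inStr (i + 1)
termination_by s.length
decreasing_by all_goals simp [List.length_tail]

def find_comment_start (line : String) : Option Int :=
  fcsGoA line.toList none 0

-- ===== PORT B =====
-- _skip_string: scan inside a string opened by `q`; returns the remaining suffix
-- together with the index just past the closing quote (list transcription of
-- Source B's index loop: the suffix is the part of the line from that index on).
def fcsSkip (s : List Char) (i : Int) (q : Char) : List Char × Int :=
  match s with
  | [] => (s, i)
  | c :: rest =>
    if c = '\\' then
      match rest with
      | [] => fcsSkip [] (i + 1) q                 -- lone backslash at end: ordinary char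
      | _ :: rest2 => fcsSkip rest2 (i + 2) q      -- consume escape pair
    else if c = q then (rest, i + 1)
    else fcsSkip rest (i + 1) q

-- needed by fcsGoB's termination proof (cited in its decreasing_by)
theorem fcsSkip_length_le (s : List Char) (i : Int) (q : Char) :
    (fcsSkip s i q).1.length ≤ s.length := by
  induction s, i using fcsSkip.induct (q := q) with
  | case1 i => simp [fcsSkip]
  | case2 i ih => rw [fcsSkip.eq_def]; simpa [fcsSkip] using ih
  | case3 i head rest2 ih => rw [fcsSkip.eq_def]; simp; omega
  | case4 i rest2 hq => rw [fcsSkip.eq_def]; simp [hq]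
  | case5 i head rest2 h1 h2 ih => rw [fcsSkip.eq_def]; simp [h1, h2]; omega

-- B's flagless outer loop: '#' is a comment; a quote hands control to fcsSkip.
def fcsGoB (s : List Char) (i : Int) : Option Int :=
  match s with
  | [] => none
  | c :: rest =>
    if c = '#' then some i
    else if c = '"' ∨ c = '\'' then
      fcsGoB (fcsSkip rest (i + 1) c).1 (fcsSkip rest (i + 1) c).2
    else fcsGoB rest (i + 1)
termination_by s.length
decreasing_by
  · have := fcsSkip_length_le rest (i + 1) c; simp; omega
  · simp

def find_comment_start_alt (line : String) : Option Int :=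
  fcsGoB line.toList 0

-- ===== PRECONDITION & SPEC =====
def Spec_find_comment_start (line : String) (out : Option Int) : Prop := out = find_comment_start_alt line
instance (line : String) (out : Option Int) : Decidable (Spec_find_comment_start line out) := by unfold Spec_find_comment_start; infer_instance

-- ===== CLAIM (what is proved, stated in full; the proofs are below) =====
def Claim_equal_find_comment_start : Prop := ∀ (line : String), Dom_find_comment_start line → Spec_find_comment_start line (find_comment_start line)

-- ===== LEMMAS AND PROOFS =====

-- Inside a string opened by quote q, A's loop does exactly what fcsSkip does and
-- then resumes with no flag at the returned suffix/index.
theorem fcsGoA_inString (s : List Char) (i : Int) (q : Char) (hq : q = '"' ∨ q = '\'') :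
    fcsGoA s (some q) i = fcsGoA (fcsSkip s i q).1 none (fcsSkip s i q).2 := by
  induction s, i using fcsSkip.induct (q := q) with
  | case1 i => simp [fcsSkip, fcsGoA]
  | case2 i ih =>
    -- s = ['\']: lone backslash at end of line
    rw [fcsGoA.eq_def, fcsSkip.eq_def]
    simp [fcsGoA, fcsSkip]
  | case3 i head rest2 ih =>
    -- escape pair consumed by both
    rw [fcsGoA.eq_def, fcsSkip.eq_def]
    simpa using ih
  | case4 i rest2 hnb =>
    -- head = q: closing quote
    rcases hq with rfl | rfl <;> (rw [fcsGoA.eq_def, fcsSkip.eq_def]; simp)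
  | case5 i head rest2 h1 h2 ih =>
    -- ordinary char: the non-matching quote keeps A's flag, fcsSkip passes it by
    have hqh : ¬q = head := fun e => h2 e.symm
    rw [fcsGoA.eq_def, fcsSkip.eq_def]
    by_cases hc : head = '"' ∨ head = '\''
    · simp [h1, h2, hc, hqh]
      exact ih
    · simp [h1, h2, hc]
      exact ih

-- Outside any string, A's loop equals B's flagless loop.
theorem fcsGoA_eq_goB (s : List Char) (i : Int) :
    fcsGoA s none i = fcsGoB s i := by
  induction s, i using fcsGoB.induct with
  | case1 i => simp [fcsGoA, fcsGoB]
  | case2 i rest2 => rw [fcsGoA.eq_def, fcsGoB.eq_def]; simp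
  | case3 i head rest2 hh hq ih =>
    rw [fcsGoA.eq_def, fcsGoB.eq_def]
    simp [hq, hh]
    rw [fcsGoA_inString rest2 (i + 1) head hq]
    exact ih
  | case4 i head rest2 hh hq ih =>
    rw [fcsGoA.eq_def, fcsGoB.eq_def]
    simp [hq, hh]
    exact ih

-- ===== VERDICT (by name: the statement is the Claim_ definition above) =====
theorem find_comment_start_spec : Claim_equal_find_comment_start := by
  intro line _
  unfold Spec_find_comment_start find_comment_start find_comment_start_alt
  exact fcsGoA_eq_goB line.toList 0
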